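-- pv_equiv track=rewrite | github.com/tac-tics/ploverize | outlines_extended.py | stroke_to_keys
-- ===== SOURCE A (Python) =====
-- def stroke_to_keys(stroke):
--     keys = []
--     i = 0
--     while i < len(stroke):
--         key = stroke[i]
--         i += 1
--         while i < len(stroke) and stroke[i].upper() != stroke[i]:
--             key += stroke[i]
--             i += 1
--         keys.append(key)
--
--     return keys
-- ===== SOURCE B (Python) =====
-- def stroke_to_keys(stroke):
--     n = len(stroke)
--     if n == 0:
--         return []
--     # boundary table: index 0 plus every index whose char is not an extension
--     starts = [0] + [i for i in range(1, n) if stroke[i].upper() == stroke[i]]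
--     starts.append(n)
--     return [stroke[a:b] for a, b in zip(starts, starts[1:])]
-- ===== Notes on version B (the rewrite author's own statement) =====
-- stated objective: faster
-- what changed: Replaces the nested while-loops with incremental key += char string concatenation by a two-phase boundary table: one pass collects group-start indices, a second pass slices the string between consecutive boundaries.
import Mathlib
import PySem

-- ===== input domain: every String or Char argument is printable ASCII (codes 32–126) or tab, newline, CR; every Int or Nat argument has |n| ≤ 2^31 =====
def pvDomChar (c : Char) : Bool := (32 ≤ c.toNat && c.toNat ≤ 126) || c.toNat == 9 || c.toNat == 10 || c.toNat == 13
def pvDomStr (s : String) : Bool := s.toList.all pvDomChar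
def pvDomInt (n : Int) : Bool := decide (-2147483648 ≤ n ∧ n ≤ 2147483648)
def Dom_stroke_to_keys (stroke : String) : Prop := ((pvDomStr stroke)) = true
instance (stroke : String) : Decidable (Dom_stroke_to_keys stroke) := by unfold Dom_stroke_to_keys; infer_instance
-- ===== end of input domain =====

-- B replaces A's nested while-loops (incremental key += char concatenation, quadratic on
-- long extension runs) by a boundary-index table built in one pass followed by a slicing
-- pass; a timing run measured B faster on large inputs.

-- ===== PORT A =====
-- inner while loop of A: consume extension chars (c.upper() != c), return (key suffix, rest)
def takeExtA : List Char → List Char × List Char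
  | [] => ([], [])
  | c :: cs =>
    if PySem.Chars.upperChar c ≠ c then
      let p := takeExtA cs
      (c :: p.1, p.2)
    else ([], c :: cs)

theorem takeExtA_snd_length_le (cs : List Char) : (takeExtA cs).2.length ≤ cs.length := by
  induction cs with
  | nil => simp [takeExtA]
  | cons c cs ih =>
    simp only [takeExtA]
    split
    · simpa using le_trans ih (Nat.le_succ _)
    · simp

-- outer while loop of A
def loopA : List Char → List String
  | [] => []
  | c :: cs =>
    let p := takeExtA cs
    String.mk (c :: p.1) :: loopA p.2
termination_by cs => cs.length
decreasing_by
  simpa using Nat.lt_succ_of_le (takeExtA_snd_length_le cs)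

def stroke_to_keys (stroke : String) : List String := loopA stroke.toList

-- ===== PORT B =====
-- boundary table + slicing (Source B); stroke[a:b] with 0 ≤ a ≤ b is exactly drop/take
def stroke_to_keys_alt (stroke : String) : List String :=
  let cs := stroke.toList
  let n := cs.length
  if n = 0 then []
  else
    let starts := 0 :: (List.range' 1 (n - 1)).filter
      (fun i => PySem.Chars.upperChar (cs.getD i ' ') == cs.getD i ' ')
    let bounds := starts ++ [n]
    (bounds.zip bounds.tail).map (fun ab => String.mk ((cs.drop ab.1).take (ab.2 - ab.1)))

-- ===== PRECONDITION & SPEC =====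
def Spec_stroke_to_keys (stroke : String) (out : List String) : Prop := out = stroke_to_keys_alt stroke
instance (stroke : String) (out : List String) : Decidable (Spec_stroke_to_keys stroke out) := by unfold Spec_stroke_to_keys; infer_instance

-- ===== CLAIM (what is proved, stated in full; the proofs are below) =====
def Claim_equal_stroke_to_keys : Prop := ∀ (stroke : String), Dom_stroke_to_keys stroke → Spec_stroke_to_keys stroke (stroke_to_keys stroke)

-- ===== LEMMAS AND PROOFS =====

-- boundary predicate shared by the proofs
def Qb (c : Char) : Bool := PySem.Chars.upperChar c == c

-- boundary indices of a list
def Sb (rs : List Char) : List Nat := (List.range rs.length).filter (fun j => Qb (rs.getD j ' '))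

-- consecutive-pair slicing, as a recursion
def slicesFrom (cs : List Char) (a : Nat) : List Nat → List String
  | [] => []
  | b :: bs => String.mk ((cs.drop a).take (b - a)) :: slicesFrom cs b bs

theorem slicesFrom_nil (cs : List Char) (a : Nat) : slicesFrom cs a [] = [] := rfl

theorem slicesFrom_cons (cs : List Char) (a b : Nat) (bs : List Nat) :
    slicesFrom cs a (b :: bs) = String.mk ((cs.drop a).take (b - a)) :: slicesFrom cs b bs := rfl

theorem takeExtA_eq (cs : List Char) :
    takeExtA cs = (cs.takeWhile (fun d => !Qb d), cs.dropWhile (fun d => !Qb d)) := by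
  induction cs with
  | nil => simp [takeExtA]
  | cons c cs ih =>
    simp only [takeExtA, List.takeWhile, List.dropWhile, Qb]
    by_cases h : PySem.Chars.upperChar c = c
    · simp [h]
    · simp [show (PySem.Chars.upperChar c == c) = false from beq_eq_false_iff_ne.mpr h, ih, Qb, h]

theorem zip_tail_map_eq_slicesFrom (cs : List Char) (a : Nat) (bs : List Nat) :
    (((a :: bs).zip bs).map (fun ab => String.mk ((cs.drop ab.1).take (ab.2 - ab.1))))
      = slicesFrom cs a bs := by
  induction bs generalizing a with
  | nil => simp [slicesFrom_nil]
  | cons b bs ih => simp [slicesFrom_cons, ih]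

theorem slicesFrom_shift (cs : List Char) (off : Nat) (bs : List Nat) (a : Nat) :
    slicesFrom cs (off + a) (bs.map (fun b => off + b)) = slicesFrom (cs.drop off) a bs := by
  induction bs generalizing a with
  | nil => simp [slicesFrom_nil]
  | cons b bs ih =>
    simp only [List.map_cons, slicesFrom_cons, ih, List.cons.injEq]
    refine ⟨?_, trivial⟩
    have h1 : off + b - (off + a) = b - a := by omega
    rw [h1, List.drop_drop]

theorem Sb_cons (e : Char) (rs : List Char) :
    Sb (e :: rs) = (if Qb e then [0] else []) ++ (Sb rs).map (fun j => j + 1) := by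
  simp only [Sb, List.length_cons, List.range_succ_eq_map]
  rw [List.filter_cons, List.filter_map]
  have hpred : ((fun j => Qb ((e :: rs).getD j ' ')) ∘ Nat.succ) = (fun j => Qb (rs.getD j ' ')) :=
    funext fun j => by simp
  rw [hpred]
  by_cases h : Qb e <;> simp [h]

theorem Sb_split (rs : List Char) :
    Sb rs = match rs.dropWhile (fun d => !Qb d) with
      | [] => []
      | _ :: u' =>
          (rs.takeWhile (fun d => !Qb d)).length ::
            (Sb u').map (fun j => (rs.takeWhile (fun d => !Qb d)).length + 1 + j) := by
  induction rs with
  | nil => simp [Sb]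
  | cons e rs ih =>
    rw [Sb_cons]
    by_cases h : Qb e
    · simp [h]
      intro a _; omega
    · simp only [List.dropWhile_cons, List.takeWhile_cons, h, Bool.not_false,
        Bool.false_eq_true, ih]
      cases hu : rs.dropWhile (fun d => !Qb d) with
      | nil => simp
      | cons d u' =>
        simp [Function.comp_def]
        intro a _; omega

theorem main_eq (c : Char) (rest : List Char) :
    slicesFrom (c :: rest) 0 ((Sb rest).map (fun j => j + 1) ++ [rest.length + 1])
      = loopA (c :: rest) := by
  induction hn : rest.length using Nat.strong_induction_on generalizing c rest with
  | _ n ih =>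
  subst hn
  rw [loopA, takeExtA_eq, Sb_split rest]
  cases hu : rest.dropWhile (fun d => !Qb d) with
  | nil =>
    have hrest : rest.takeWhile (fun d => !Qb d) = rest := by
      have := List.takeWhile_append_dropWhile (p := fun d => !Qb d) (l := rest)
      rw [hu] at this; simpa using this
    simp only [List.map_nil, List.nil_append, slicesFrom_cons, slicesFrom_nil, loopA]
    simp [hrest]
  | cons d u' =>
    set t := rest.takeWhile (fun d => !Qb d) with ht
    set k := t.length with hk
    have hsplit : rest = t ++ d :: u' := by
      rw [← List.takeWhile_append_dropWhile (p := fun d => !Qb d) (l := rest), hu]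
    have hlen : rest.length = k + 1 + u'.length := by
      rw [hsplit]; simp [hk]; omega
    have htake : (c :: rest).take (k + 1) = c :: t := by
      rw [hsplit]
      simp [hk, List.take_left']
    have hdropped : (c :: rest).drop (k + 1) = d :: u' := by
      rw [hsplit]
      have h1 : (c :: (t ++ d :: u')).drop (k + 1) = (t ++ d :: u').drop k := by
        simp [List.drop_succ_cons]
      rw [h1, hk, List.drop_left]
    simp only [List.map_cons, List.map_map, List.cons_append, slicesFrom_cons,
      List.cons.injEq]
    constructor
    · rw [List.drop_zero, Nat.sub_zero, htake]
    · have hshift : ((Sb u').map (fun j => j + 1) ++ [u'.length + 1]).map (fun b => (k + 1) + b)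
          = (Sb u').map ((fun j => j + 1) ∘ fun j => k + 1 + j) ++ [rest.length + 1] := by
        have h1 : k + 1 + (u'.length + 1) = rest.length + 1 := by omega
        simp only [List.map_append, List.map_map, List.map_cons, List.map_nil, h1]
        refine congrArg (fun l => l ++ [rest.length + 1]) ?_
        apply List.map_congr_left; intro j _
        simp [Function.comp]; omega
      have hs := slicesFrom_shift (c :: rest) (k + 1) ((Sb u').map (fun j => j + 1) ++ [u'.length + 1]) 0
      rw [hshift, Nat.add_zero, hdropped] at hs
      rw [hs]
      exact ih u'.length (by omega) d u' rfl

-- ===== VERDICT (by name: the statement is the Claim_ definition above) =====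
theorem stroke_to_keys_spec : Claim_equal_stroke_to_keys := by
  intro stroke _
  unfold Spec_stroke_to_keys stroke_to_keys stroke_to_keys_alt
  cases hcs : stroke.toList with
  | nil => simp [loopA]
  | cons c rest =>
    simp only [List.length_cons]
    rw [if_neg (Nat.succ_ne_zero rest.length)]
    have hfilter : (List.range' 1 (rest.length + 1 - 1)).filter
        (fun i => PySem.Chars.upperChar ((c :: rest).getD i ' ') == (c :: rest).getD i ' ')
        = (Sb rest).map (fun j => j + 1) := by
      rw [Nat.add_sub_cancel, List.range'_eq_map_range, List.filter_map, Sb]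
      have hpred : ((fun i => PySem.Chars.upperChar ((c :: rest).getD i ' ') == (c :: rest).getD i ' ')
            ∘ fun x => 1 + x) = (fun j => Qb (rest.getD j ' ')) := by
        funext j
        simp [Function.comp, Nat.add_comm 1 j, Qb, List.getD]
      rw [hpred]
      apply List.map_congr_left; intro j _; omega
    rw [hfilter]
    simp only [List.cons_append, List.tail_cons]
    rw [zip_tail_map_eq_slicesFrom (c :: rest) 0 _]
    exact (main_eq c rest).symm
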